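-- pv_equiv track=rewrite | github.com/ThomasGUICHARD/RechercheInformation | practice4/inex_utils.py | xml_subpath_of
-- ===== SOURCE A (Python) =====
-- from typing import Dict, Iterator, List, Set, Generator, Tuple, TypeVar
--
-- def xml_subpath_of(p: str) -> Generator[str, None, None]:
--     """
--     get all xml sub path of a path, example:
--     "", "/article[1]", "/article[1]/bdy[1]", "/article[1]/bdy[1]/sec[2]"
--     """
--     try:
--         i = -1
--         while True:
--             i = p.index("/", i + 1)
--             yield p[:i]
--     except ValueError:
--         yield p
-- ===== SOURCE B (Python) =====
-- def xml_subpath_of(p: str):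
--     """Yield every prefix of p that ends just before a slash, then p itself."""
--     parts = p.split("/")
--     for k in range(1, len(parts) + 1):
--         yield "/".join(parts[:k])
-- ===== Notes on version B (the rewrite author's own statement) =====
-- stated objective: idiomatic
-- what changed: Replaced the try/except index-scanning while loop by a single split on the slash separator followed by joining the cumulative prefixes of the parts list.
import Mathlib
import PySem

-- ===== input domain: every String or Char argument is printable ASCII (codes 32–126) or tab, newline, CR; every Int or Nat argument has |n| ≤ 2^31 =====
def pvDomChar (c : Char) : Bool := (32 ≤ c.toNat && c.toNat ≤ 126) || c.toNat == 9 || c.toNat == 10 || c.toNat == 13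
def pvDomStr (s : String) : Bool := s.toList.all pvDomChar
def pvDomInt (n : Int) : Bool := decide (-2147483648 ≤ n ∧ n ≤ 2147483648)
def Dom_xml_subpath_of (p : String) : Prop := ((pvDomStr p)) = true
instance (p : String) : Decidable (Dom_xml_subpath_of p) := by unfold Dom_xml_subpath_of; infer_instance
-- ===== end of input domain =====

-- B replaces A's try/except index-scanning loop by one split("/") plus joins of the
-- cumulative prefixes of the parts (idiomatic; not faster).

-- ===== PORT A =====
-- A's while-loop: i = p.index("/", i + 1); yield p[:i]; the final ValueError yields p.
-- The fuel argument only makes the loop total (each found '/' is at an index < p.length,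
-- so p.length + 1 search steps always suffice); it never changes the computed value.
def xmlAGo (p : List Char) (start : Nat) (fuel : Nat) : List String :=
  match fuel with
  | 0 => []
  | fuel + 1 =>
    let j := PySem.Chars.findFrom p ['/'] (start : Int) none
    if j = -1 then [String.ofList p]
    else String.ofList (PySem.Chars.slice p none (some j)) :: xmlAGo p (j.toNat + 1) fuel

def xml_subpath_of (p : String) : List String :=
  xmlAGo p.toList 0 (p.toList.length + 1)

-- ===== PORT B =====
-- parts = p.split("/"); for k in range(1, len(parts)+1): yield "/".join(parts[:k])
def xml_subpath_of_alt (p : String) : List String :=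
  let parts := PySem.Chars.splitOn p.toList ['/']
  (List.range parts.length).map
    (fun k => String.ofList (PySem.Chars.join ['/'] (parts.take (k + 1))))

-- ===== PRECONDITION & SPEC =====
def Spec_xml_subpath_of (p : String) (out : List String) : Prop := out = xml_subpath_of_alt p
instance (p : String) (out : List String) : Decidable (Spec_xml_subpath_of p out) := by unfold Spec_xml_subpath_of; infer_instance

-- ===== CLAIM (what is proved, stated in full; the proofs are below) =====
def Claim_equal_xml_subpath_of : Prop := ∀ (p : String), Dom_xml_subpath_of p → Spec_xml_subpath_of p (xml_subpath_of p)

-- ===== LEMMAS AND PROOFS =====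

-- A reference single-char splitter; PySem.Chars.splitOn with sep = ['/'] equals sp '/' · [].
def sp (c : Char) : List Char → List Char → List (List Char)
  | [], cur => [cur.reverse]
  | x :: rest, cur => if x = c then cur.reverse :: sp c rest [] else sp c rest (x :: cur)

theorem splitOn_go_eq_sp (c : Char) :
    ∀ fuel l cur acc, l.length ≤ fuel →
      PySem.Chars.splitOn.go [c] fuel l cur acc = acc.reverse ++ sp c l cur := by
  intro fuel
  induction fuel with
  | zero => intro l cur acc h
            have : l = [] := List.eq_nil_of_length_eq_zero (Nat.le_zero.mp h)
            subst this; simp [PySem.Chars.splitOn.go, sp]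
  | succ f ih =>
    intro l cur acc h
    cases l with
    | nil => simp [PySem.Chars.splitOn.go, sp]
    | cons x rest =>
      by_cases hx : x = c
      · subst hx
        simp only [PySem.Chars.splitOn.go, List.isPrefixOf, BEq.rfl, Bool.true_and, sp]
        rw [ih]
        · simp
        · simpa using Nat.le_of_succ_le_succ h
      · simp only [PySem.Chars.splitOn.go, sp, if_neg hx]
        have hpre : [c].isPrefixOf (x :: rest) = false := by
          simp [List.isPrefixOf]
          exact fun hc => absurd hc.symm hx
        rw [hpre]
        simp only [Bool.false_eq_true, if_false]
        exact ih rest (x :: cur) acc (by simpa using Nat.le_of_succ_le_succ h)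

theorem splitOn_eq_sp (c : Char) (l : List Char) :
    PySem.Chars.splitOn l [c] = sp c l [] := by
  rw [PySem.Chars.splitOn, splitOn_go_eq_sp c _ _ _ _ (by omega)]; simp

theorem sp_no (c : Char) (l : List Char) (h : c ∉ l) :
    ∀ cur, sp c l cur = [cur.reverse ++ l] := by
  induction l with
  | nil => intro cur; simp [sp]
  | cons x rest ih =>
    intro cur
    have hx : ¬ x = c := fun e => h (e ▸ List.mem_cons_self ..)
    rw [sp, if_neg hx, ih (fun hm => h (List.mem_cons_of_mem _ hm))]
    simp

theorem sp_split (c : Char) (rest : List Char) :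
    ∀ a cur, c ∉ a → sp c (a ++ c :: rest) cur = (cur.reverse ++ a) :: sp c rest [] := by
  intro a
  induction a with
  | nil => intro cur h; simp [sp]
  | cons x t ih =>
    intro cur h
    have hx : ¬ x = c := fun e => h (e ▸ List.mem_cons_self ..)
    rw [List.cons_append, sp, if_neg hx, ih _ (fun hm => h (List.mem_cons_of_mem _ hm))]
    simp

theorem sp_ne_nil (c : Char) (l cur : List Char) : sp c l cur ≠ [] := by
  induction l generalizing cur with
  | nil => simp [sp]
  | cons x rest ih => rw [sp]; split <;> simp [ih]

theorem find_go_no (c : Char) (l : List Char) (h : c ∉ l) :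
    ∀ k, PySem.Chars.find.go [c] l k = -1 := by
  induction l with
  | nil => intro k; simp [PySem.Chars.find.go]
  | cons x rest ih =>
    intro k
    have hx : ¬ x = c := fun e => h (e ▸ List.mem_cons_self ..)
    simp only [PySem.Chars.find.go, List.isPrefixOf]
    rw [if_neg (by simp; exact fun e => hx e.symm)]
    exact ih (fun hm => h (List.mem_cons_of_mem _ hm)) _

theorem find_go_split (c : Char) (rest : List Char) :
    ∀ (a : List Char) (k : Nat), c ∉ a →
      PySem.Chars.find.go [c] (a ++ c :: rest) k = (k : Int) + a.length := by
  intro a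
  induction a with
  | nil => intro k h; simp [PySem.Chars.find.go, List.isPrefixOf]
  | cons x t ih =>
    intro k h
    have hx : ¬ x = c := fun e => h (e ▸ List.mem_cons_self ..)
    simp only [List.cons_append, PySem.Chars.find.go, List.isPrefixOf]
    rw [if_neg (by simp; exact fun e => hx e.symm)]
    rw [ih _ (fun hm => h (List.mem_cons_of_mem _ hm))]
    simp only [List.length_cons]; push_cast; omega

theorem find_no (c : Char) (l : List Char) (h : c ∉ l) : PySem.Chars.find l [c] = -1 :=
  find_go_no c l h 0

theorem find_split (c : Char) (a rest : List Char) (h : c ∉ a) :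
    PySem.Chars.find (a ++ c :: rest) [c] = (a.length : Int) := by
  rw [PySem.Chars.find, find_go_split c rest a 0 h]; simp

theorem decomp (c : Char) (cs : List Char) :
    c ∉ cs ∨ ∃ a rest, cs = a ++ c :: rest ∧ c ∉ a := by
  induction cs with
  | nil => left; simp
  | cons x t ih =>
    by_cases hx : x = c
    · right; exact ⟨[], t, by simp [hx], by simp⟩
    · rcases ih with h | ⟨a, rest, rfl, ha⟩
      · left; simp [h]; exact fun e => hx e.symm
      · right; exact ⟨x :: a, rest, rfl, by simp [ha]; exact fun e => hx e.symm⟩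

theorem xmlAGo_no (cs : List Char) (fuel : Nat) (h : '/' ∉ cs) :
    xmlAGo cs 0 (fuel + 1) = [String.ofList cs] := by
  rw [xmlAGo]
  simp [find_no '/' cs h]

theorem xmlAGo_first (a rest : List Char) (fuel : Nat) (h : '/' ∉ a) :
    xmlAGo (a ++ '/' :: rest) 0 (fuel + 1)
      = String.ofList a :: xmlAGo (a ++ '/' :: rest) (a.length + 1) fuel := by
  rw [xmlAGo]
  simp only [Nat.cast_zero, PySem.Chars.findFrom_zero, find_split '/' a rest h]
  rw [if_neg (by omega)]
  have h1 : ((a.length : Int)).toNat = a.length := by omega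
  rw [h1]
  congr 1
  show String.ofList (PySem.List.slice (a ++ '/' :: rest) none (some ((a.length : Nat) : Int))) = _
  rw [PySem.List.slice_to_natCast]
  simp

theorem xmlAGo_shift (a rest : List Char) (_h : '/' ∉ a) :
    ∀ fuel start, start ≤ rest.length →
      xmlAGo (a ++ '/' :: rest) (a.length + 1 + start) fuel
        = (xmlAGo rest start fuel).map (fun s => String.ofList (a ++ '/' :: s.toList)) := by
  intro fuel
  induction fuel with
  | zero => intro start _; simp [xmlAGo]
  | succ f ih =>
    intro start hst
    have hlen : (a ++ '/' :: rest).length = a.length + 1 + rest.length := by simp; omega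
    have hle : a.length + 1 + start ≤ (a ++ '/' :: rest).length := by omega
    have hdrop : List.drop (a.length + 1 + start) (a ++ '/' :: rest) = List.drop start rest := by
      have : a.length + 1 + start = a.length + (start + 1) := by omega
      rw [this, List.drop_length_add_append, List.drop_succ_cons]
    rw [xmlAGo, xmlAGo]
    rw [PySem.Chars.findFrom_natCast _ _ _ hle, PySem.Chars.findFrom_natCast _ _ _ hst, hdrop]
    by_cases hf : PySem.Chars.find (List.drop start rest) ['/'] = -1
    · simp only [hf, ite_true]
      simp
    · have hge : 0 ≤ PySem.Chars.find (List.drop start rest) ['/'] := by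
        have := PySem.Chars.neg_one_le_find (List.drop start rest) ['/']
        omega
      set t := PySem.Chars.find (List.drop start rest) ['/'] with ht
      rw [if_neg hf, if_neg hf, if_neg (by omega), if_neg (by omega)]
      -- the '/' found is at index start + t.toNat in rest, so < rest.length
      have hne : PySem.Chars.findFrom rest ['/'] (start : Int) none ≠ -1 := by
        rw [PySem.Chars.findFrom_natCast _ _ _ hst, ← ht, if_neg hf]; omega
      have hspec := PySem.Chars.findFrom_natCast_spec rest ['/'] start hst hne
      have hidx : (PySem.Chars.findFrom rest ['/'] (start : Int) none).toNat < rest.length := by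
        rcases hspec.2.1 with ⟨s', hs'⟩
        have := congrArg List.length hs'
        simp at this
        omega
      have hfr : PySem.Chars.findFrom rest ['/'] (start : Int) none = (start : Int) + t := by
        rw [PySem.Chars.findFrom_natCast _ _ _ hst, ← ht, if_neg hf]
      have hlt : start + t.toNat < rest.length := by
        rw [hfr] at hidx; omega
      simp only [List.map_cons]
      congr 1
      · -- slice equality
        have e1 : (((a.length + 1 + start : Nat) : Int) + t) = (((a.length + 1 + start + t.toNat : Nat) : Int)) := by push_cast; omega
        have e2 : ((start : Int) + t) = ((start + t.toNat : Nat) : Int) := by push_cast; omega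
        show String.ofList (PySem.List.slice _ none (some _)) = String.ofList (a ++ '/' :: (String.ofList (PySem.List.slice _ none (some _))).toList)
        rw [e1, e2, PySem.List.slice_to_natCast, PySem.List.slice_to_natCast]
        have h5 : a.length + 1 + start + t.toNat = a.length + ((start + t.toNat) + 1) := by omega
        rw [h5, List.take_length_add_append, List.take_succ_cons]
        simp
      · have e3 : (((a.length + 1 + start : Nat) : Int) + t).toNat + 1 = a.length + 1 + (t.toNat + start + 1) := by omega
        have e4 : ((start : Int) + t).toNat + 1 = t.toNat + start + 1 := by omega
        rw [e3, e4]
        exact ih _ (by omega)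

def bsp (cs : List Char) : List String :=
  (List.range (sp '/' cs []).length).map
    (fun k => String.ofList (PySem.Chars.join ['/'] ((sp '/' cs []).take (k + 1))))

theorem bsp_no (cs : List Char) (h : '/' ∉ cs) : bsp cs = [String.ofList cs] := by
  unfold bsp
  rw [sp_no '/' cs h []]
  simp [PySem.Chars.join_singleton]

theorem bsp_split (a rest : List Char) (h : '/' ∉ a) :
    bsp (a ++ '/' :: rest)
      = String.ofList a :: (bsp rest).map (fun s => String.ofList (a ++ '/' :: s.toList)) := by
  unfold bsp
  rw [sp_split '/' rest a [] h]
  simp only [List.reverse_nil, List.nil_append, List.length_cons]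
  rw [List.range_succ_eq_map]
  simp only [List.map_cons, List.map_map]
  congr 1
  · simp [PySem.Chars.join_singleton]
  · apply List.map_congr_left
    intro k hk
    simp only [List.mem_range] at hk
    simp only [Function.comp]
    have hne : (sp '/' rest []).take (k + 1) ≠ [] := by
      have := sp_ne_nil '/' rest []
      cases hsp : sp '/' rest [] with
      | nil => exact absurd hsp this
      | cons y ys => simp
    cases htk : (sp '/' rest []).take (k + 1) with
    | nil => exact absurd htk hne
    | cons y ys =>
      show String.ofList (PySem.Chars.join ['/'] ((a :: sp '/' rest []).take (Nat.succ k + 1))) = _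
      have : (a :: sp '/' rest []).take (Nat.succ k + 1) = a :: (sp '/' rest []).take (k + 1) := by
        simp [List.take_succ_cons]
      rw [this, htk, PySem.Chars.join_cons_cons]
      simp

theorem alt_eq_bsp (p : String) : xml_subpath_of_alt p = bsp p.toList := by
  unfold xml_subpath_of_alt bsp
  rw [splitOn_eq_sp]

theorem mainAux : ∀ n cs, List.length cs ≤ n → ∀ fuel, List.length cs < fuel →
    xmlAGo cs 0 fuel = bsp cs := by
  intro n
  induction n with
  | zero =>
    intro cs hcs fuel hf
    have hnil : cs = [] := List.eq_nil_of_length_eq_zero (Nat.le_zero.mp hcs)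
    subst hnil
    obtain ⟨f, rfl⟩ : ∃ f, fuel = f + 1 := ⟨fuel - 1, by omega⟩
    rw [xmlAGo_no [] f (by simp), bsp_no [] (by simp)]
  | succ n ih =>
    intro cs hcs fuel hf
    obtain ⟨f, rfl⟩ : ∃ f, fuel = f + 1 := ⟨fuel - 1, by omega⟩
    rcases decomp '/' cs with hno | ⟨a, rest, rfl, ha⟩
    · rw [xmlAGo_no cs f hno, bsp_no cs hno]
    · have hlen : (a ++ '/' :: rest).length = a.length + 1 + rest.length := by
        simp; omega
      rw [xmlAGo_first a rest f ha, bsp_split a rest ha]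
      congr 1
      have := xmlAGo_shift a rest ha f 0 (Nat.zero_le _)
      rw [Nat.add_zero] at this
      rw [this]
      congr 1
      exact ih rest (by omega) f (by omega)

-- ===== VERDICT (by name: the statement is the Claim_ definition above) =====
theorem xml_subpath_of_spec : Claim_equal_xml_subpath_of := by
  intro p _
  unfold Spec_xml_subpath_of
  rw [alt_eq_bsp, xml_subpath_of]
  exact mainAux p.toList.length p.toList le_rfl _ (Nat.lt_succ_self _)
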